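-- pv_equiv track=rewrite | github.com/ras-rap/UCL | libs/python/parser.py | _contains_operators
-- ===== SOURCE A (Python) =====
-- def _contains_operators(value_str: str) -> bool:
--     """
--     Check if a string contains arithmetic operators (+, -, *, /, %) outside of quoted strings.
--
--     This helps differentiate between a value that is a literal string containing
--     an operator (e.g., "my+string") and an actual expression (e.g., "1+2").
--
--     Args:
--         value_str (str): The string to check.
--
--     Returns:
--         bool: True if operators are found outside of strings, False otherwise.
--     """
--     in_string = False
--     quote_char = None
--
--     for i, char in enumerate(value_str):
--         if not in_string and char in ['"', "'"]:
--             in_string = True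
--             quote_char = char
--         elif in_string and char == quote_char and \
--                 (i == 0 or value_str[i - 1] != '\\'):
--             in_string = False
--             quote_char = None
--         elif not in_string and char in ['+', '-', '*', '/', '%']:
--             return True
--
--     return False
-- ===== SOURCE B (Python) =====
-- def _contains_operators(value_str: str) -> bool:
--     """Cursor-based scan: skip over each quoted literal, report an operator in any unquoted gap."""
--     n = len(value_str)
--     i = 0
--     while i < n:
--         c = value_str[i]
--         if c == '"' or c == "'":
--             # skip to the matching close quote (same char, not preceded by a backslash),
--             # or to the end of the string if the literal is unterminated
--             j = i + 1
--             while j < n and not (value_str[j] == c and value_str[j - 1] != '\\'):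
--                 j += 1
--             i = j + 1
--         elif c in '+-*/%':
--             return True
--         else:
--             i += 1
--     return False
-- ===== Notes on version B (the rewrite author's own statement) =====
-- stated objective: alternative
-- what changed: Replaced the single-pass boolean in_string/quote_char state machine with a cursor scan that, at each opening quote, runs an inner skip loop to the matching close quote (same quote char not preceded by a backslash, or end of string) and checks only the unquoted gaps for operators.
import Mathlib
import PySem

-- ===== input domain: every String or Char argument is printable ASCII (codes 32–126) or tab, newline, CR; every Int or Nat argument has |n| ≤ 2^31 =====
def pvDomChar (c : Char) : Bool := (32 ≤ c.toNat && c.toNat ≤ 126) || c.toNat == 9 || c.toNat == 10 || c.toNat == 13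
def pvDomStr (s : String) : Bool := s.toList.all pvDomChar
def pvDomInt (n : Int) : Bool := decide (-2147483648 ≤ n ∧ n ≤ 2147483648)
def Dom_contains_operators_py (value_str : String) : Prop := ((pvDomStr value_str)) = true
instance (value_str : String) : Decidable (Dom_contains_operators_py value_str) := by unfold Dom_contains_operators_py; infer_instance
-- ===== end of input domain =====

-- B replaces A's in_string/quote_char state machine by a cursor scan with an inner
-- skip loop over each quoted literal (alternative decomposition, same cost).

-- ===== PORT A =====
-- enumerate(value_str)
def pvEnumFrom (k : Nat) : List Char → List (Nat × Char)
  | [] => []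
  | c :: r => (k, c) :: pvEnumFrom (k + 1) r

-- the for-loop of A; s is the whole string for the value_str[i-1] access
-- (Python only evaluates value_str[i-1] after `i == 0` is false, so i-1 is in range:
--  List.getD (i-1) is exact there)
def pvLoopA (s : List Char) : List (Nat × Char) → Bool → Option Char → Bool
  | [], _, _ => false
  | (i, c) :: rest, inStr, qc =>
    if !inStr && (c = '"' || c = '\'') then
      pvLoopA s rest true (some c)
    else if inStr && some c = qc && (decide (i = 0) || !(s.getD (i - 1) ' ' = '\\')) then
      pvLoopA s rest false none
    else if !inStr && (c = '+' || c = '-' || c = '*' || c = '/' || c = '%') then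
      true
    else
      pvLoopA s rest inStr qc

def contains_operators_py (value_str : String) : Bool :=
  pvLoopA value_str.toList (pvEnumFrom 0 value_str.toList) false none

-- ===== PORT B =====
-- inner while loop: skip until the closing quote q (not preceded by '\'), carrying the
-- previous character; returns the remainder after the closing quote (or [] at end of string)
def pvSkipB (q prev : Char) : List Char → List Char
  | [] => []
  | c :: rest => if c = q && !(prev = '\\') then rest else pvSkipB q c rest

theorem pvSkipB_length_le (q prev : Char) (l : List Char) : (pvSkipB q prev l).length ≤ l.length := by
  induction l generalizing prev with
  | nil => simp [pvSkipB]
  | cons c rest ih =>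
    simp only [pvSkipB]
    split
    · simp
    · exact Nat.le_succ_of_le (ih c)

-- outer while loop of B
def pvLoopB : List Char → Bool
  | [] => false
  | c :: rest =>
    if c = '"' || c = '\'' then
      pvLoopB (pvSkipB c c rest)
    else if c = '+' || c = '-' || c = '*' || c = '/' || c = '%' then
      true
    else
      pvLoopB rest
termination_by l => l.length
decreasing_by
  · exact Nat.lt_succ_of_le (pvSkipB_length_le _ _ _)
  · simp

def contains_operators_py_alt (value_str : String) : Bool :=
  pvLoopB value_str.toList

-- ===== PRECONDITION & SPEC =====
def Spec_contains_operators_py (value_str : String) (out : Bool) : Prop := out = contains_operators_py_alt value_str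
instance (value_str : String) (out : Bool) : Decidable (Spec_contains_operators_py value_str out) := by unfold Spec_contains_operators_py; infer_instance

-- ===== CLAIM (what is proved, stated in full; the proofs are below) =====
def Claim_equal_contains_operators_py : Prop := ∀ (value_str : String), Dom_contains_operators_py value_str → Spec_contains_operators_py value_str (contains_operators_py value_str)

-- ===== LEMMAS AND PROOFS =====

theorem pv_drop_cons {s l : List Char} {c : Char} {k : Nat} (h : s.drop k = c :: l) :
    s.drop (k + 1) = l ∧ s.getD k ' ' = c := by
  constructor
  · have := List.drop_drop (l := s) (i := 1) (j := k)
    rw [← this, h]; rfl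
  · have : s.getD k ' ' = (s.drop k).getD 0 ' ' := by
      rcases Nat.lt_or_ge k s.length with hk | hk
      · simp [List.getD, List.getElem?_drop]
      · have : s.drop k = [] := List.drop_eq_nil_of_le hk
        rw [this] at h; exact absurd h (by simp)
    rw [this, h]; rfl

-- the main invariant: A's two modes against B's outer loop / inner skip
theorem pv_main (s : List Char) (l : List Char) (k : Nat) (hl : s.drop k = l) :
    pvLoopA s (pvEnumFrom k l) false none = pvLoopB l ∧
    (∀ q, 1 ≤ k →
      pvLoopA s (pvEnumFrom k l) true (some q) = pvLoopB (pvSkipB q (s.getD (k - 1) ' ') l)) := by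
  induction l generalizing k with
  | nil => simp [pvEnumFrom, pvLoopA, pvLoopB, pvSkipB]
  | cons c rest ih =>
    obtain ⟨hdrop, hget⟩ := pv_drop_cons hl
    obtain ⟨ihA, ihB⟩ := ih (k + 1) hdrop
    constructor
    · -- outside-string mode
      by_cases hq : c = '"' ∨ c = '\''
      · have hq' : (c = '"' || c = '\'') = true := by
          rcases hq with h | h <;> simp [h]
        simp only [pvEnumFrom, pvLoopA, pvLoopB, hq', Bool.not_false, Bool.true_and, ite_true]
        have := ihB c (Nat.le_add_left 1 k)
        simpa [Nat.add_sub_cancel, show s[k]?.getD ' ' = c from hget] using this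
      · have hq' : (c = '"' || c = '\'') = false := by
          simp only [Bool.or_eq_false_iff, decide_eq_false_iff_not]
          exact ⟨fun h => hq (Or.inl h), fun h => hq (Or.inr h)⟩
        by_cases hop : (c = '+' || c = '-' || c = '*' || c = '/' || c = '%') = true
        · simp [pvEnumFrom, pvLoopA, pvLoopB, hq', hop]
        · simp [pvEnumFrom, pvLoopA, pvLoopB, hq', hop, ihA]
    · -- inside-string mode with quote q, k ≥ 1 so the i = 0 disjunct is dead
      intro q hk
      have hk0 : (decide (k = 0)) = false := by
        simp only [decide_eq_false_iff_not]; omega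
      by_cases hclose : (c = q && !(s.getD (k - 1) ' ' = '\\')) = true
      · have hc : c = q := by
          rcases (Bool.and_eq_true _ _).mp hclose with ⟨h, _⟩; exact of_decide_eq_true h
        have hprev : ¬ s[k - 1]?.getD ' ' = '\\' :=
          of_decide_eq_false (Bool.not_eq_true' _ ▸ ((Bool.and_eq_true _ _).mp hclose).2)
        simp only [pvEnumFrom, pvLoopA, pvSkipB, hk0]
        rw [if_neg (by simp), if_pos (by simp [hc, hprev]), if_pos (by simp [hc, hprev])]
        exact ihA
      · simp only [pvEnumFrom, pvLoopA, pvSkipB, hk0]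
        rw [if_neg (by simp), if_neg, if_neg (by simp), if_neg hclose]
        · have := ihB q (Nat.le_add_left 1 (k + 1 - 1))
          simpa [Nat.add_sub_cancel, show s[k]?.getD ' ' = c from hget] using this
        · intro h
          apply hclose
          have h' := (Bool.and_eq_true _ _).mp h
          have hc : c = q := by
            simpa using of_decide_eq_true ((Bool.and_eq_true _ _).mp h'.1).2
          have hb : ¬ s[k - 1]?.getD ' ' = '\\' := by simpa using h'.2
          simp [hc, hb]

-- ===== VERDICT (by name: the statement is the Claim_ definition above) =====
theorem contains_operators_py_spec : Claim_equal_contains_operators_py := by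
  intro s _
  unfold Spec_contains_operators_py contains_operators_py contains_operators_py_alt
  exact (pv_main s.toList s.toList 0 (by simp)).1
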